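-- pv_equiv track=rewrite | github.com/Ilya-Stetskiy/OpenFold3_project | openfold-3/openfold3/panel_profiling.py | _descendant_pids
-- ===== SOURCE A (Python) =====
-- from typing import Any
--
-- def _descendant_pids(root_pid: int, snapshots: dict[int, dict[str, Any]]) -> list[int]:
--     if root_pid not in snapshots:
--         return []
--     children_by_parent: dict[int, list[int]] = {}
--     for pid, row in snapshots.items():
--         children_by_parent.setdefault(int(row["ppid"]), []).append(pid)
--     ordered: list[int] = []
--     queue = [root_pid]
--     seen: set[int] = set()
--     while queue:
--         current = queue.pop(0)
--         if current in seen: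
--             continue
--         seen.add(current)
--         ordered.append(current)
--         queue.extend(sorted(children_by_parent.get(current, [])))
--     return ordered
-- ===== SOURCE B (Python) =====
-- def _descendant_pids(root_pid: int, snapshots: dict) -> list[int]:
--     if root_pid not in snapshots:
--         return []
--     parent = {pid: int(row["ppid"]) for pid, row in snapshots.items()}
--     n = len(parent)
--     keyed = []
--     for pid in parent:
--         chain = [pid]
--         node = pid
--         steps = 0
--         while node != root_pid and steps < n:
--             nxt = parent.get(node)
--             if nxt is None:
--                 break
--             node = nxt
--             chain.append(node)
--             steps += 1
--         if node == root_pid: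
--             keyed.append((tuple(reversed(chain[:-1])), pid))
--     keyed.sort(key=lambda t: (len(t[0]), t[0]))
--     return [pid for _, pid in keyed]
-- ===== Notes on version B (the rewrite author's own statement) =====
-- stated objective: alternative
-- what changed: Replaces the root-down BFS (children-by-parent index + FIFO queue with pop(0) + visited set) by a per-process upward walk along the ppid chain: each pid that reaches the root yields a (path-from-root) key, and one sort by (depth, path) reproduces the BFS order; no children index, no queue, no visited set.
import Mathlib
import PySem

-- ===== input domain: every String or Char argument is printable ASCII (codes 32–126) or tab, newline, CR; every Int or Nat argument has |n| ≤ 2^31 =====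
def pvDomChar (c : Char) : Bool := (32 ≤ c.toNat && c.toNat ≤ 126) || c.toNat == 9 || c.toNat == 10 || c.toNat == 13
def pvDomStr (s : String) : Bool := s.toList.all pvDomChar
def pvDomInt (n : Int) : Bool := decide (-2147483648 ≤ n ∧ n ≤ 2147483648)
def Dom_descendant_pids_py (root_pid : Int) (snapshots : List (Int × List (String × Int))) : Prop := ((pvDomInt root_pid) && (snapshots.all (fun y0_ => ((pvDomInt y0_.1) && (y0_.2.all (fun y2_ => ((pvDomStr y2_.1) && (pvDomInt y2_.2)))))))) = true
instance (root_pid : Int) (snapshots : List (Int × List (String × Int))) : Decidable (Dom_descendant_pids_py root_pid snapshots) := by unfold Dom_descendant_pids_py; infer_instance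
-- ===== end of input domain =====

-- B replaces A's root-down BFS (children index + FIFO queue + seen set) by a per-process upward
-- walk along the ppid chain plus one sort by (depth, path); return values proved equal on Pre_.

-- ===== PORT A =====
-- int(row["ppid"]) : first-match lookup in the row dict (shared by both ports' transliterations)
def pvRowPpid? (row : List (String × Int)) : Option Int := (PySem.Dict.mk row).get? "ppid"

-- children_by_parent: for pid, row in snapshots.items(): setdefault(int(row["ppid"]), []).append(pid)
-- (a row without a "ppid" key is skipped here; Python raises KeyError there — excluded by Pre_)
def pvChildren (snaps : PySem.Dict Int (List (String × Int))) : PySem.Dict Int (List Int) :=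
  snaps.items.foldl
    (fun d pr =>
      match pvRowPpid? pr.2 with
      | some pp => d.modify pp [] (· ++ [pr.1])
      | none => d)
    PySem.Dict.empty

-- the while-queue loop of A; one fuel unit per pop (fuel = number of dict rows + 1 always
-- suffices: every queue entry is the root or one occurrence of a pid in a children list)
def pvLoopA (cbp : PySem.Dict Int (List Int)) : Nat → List Int → PySem.Set Int → List Int → List Int
  | _, [], _, ordered => ordered
  | 0, _ :: _, _, ordered => ordered
  | fuel + 1, current :: rest, seen, ordered =>
    if PySem.Set.contains seen current then pvLoopA cbp fuel rest seen ordered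
    else pvLoopA cbp fuel (rest ++ PySem.List.sorted (cbp.getD current []) (fun x => x) false)
           (PySem.Set.add seen current) (ordered ++ [current])

def descendant_pids_py (root_pid : Int) (snapshots : List (Int × List (String × Int))) : List Int :=
  let snaps := PySem.Dict.mk snapshots
  if snaps.contains root_pid = false then []
  else pvLoopA (pvChildren snaps) (snaps.size + 1) [root_pid] PySem.Set.empty []

-- ===== PORT B =====
-- parent = {pid: int(row["ppid"]) for pid, row in snapshots.items()}  (rows without "ppid": KeyError, outside Pre_)
def pvParent (snaps : PySem.Dict Int (List (String × Int))) : PySem.Dict Int Int :=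
  snaps.items.foldl
    (fun d pr =>
      match pvRowPpid? pr.2 with
      | some pp => d.insert pr.1 pp
      | none => d)
    PySem.Dict.empty

-- the inner while loop: walk up the ppid chain, appending each parent to the chain,
-- for at most `steps` iterations (steps = len(parent) in B)
def pvWalk (pm : PySem.Dict Int Int) (root : Int) : Nat → Int → List Int → List Int × Int
  | 0, node, chain => (chain, node)
  | s + 1, node, chain =>
    if node == root then (chain, node)
    else
      match pm.get? node with
      | none => (chain, node)
      | some nxt => pvWalk pm root s nxt (chain ++ [nxt])

-- for pid in parent: walk; if the walk ended at root, record (tuple(reversed(chain[:-1])), pid)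
def pvKeyed (pm : PySem.Dict Int Int) (root : Int) (n : Nat) : List (List Int × Int) :=
  pm.keys.foldl
    (fun acc pid =>
      let r := pvWalk pm root n pid [pid]
      if r.2 == root then acc ++ [(r.1.dropLast.reverse, pid)] else acc)
    []

def descendant_pids_py_alt (root_pid : Int) (snapshots : List (Int × List (String × Int))) : List Int :=
  let snaps := PySem.Dict.mk snapshots
  if snaps.contains root_pid = false then []
  else
    let parent := pvParent snaps
    let keyed := pvKeyed parent root_pid parent.size
    (PySem.List.sorted2 keyed (fun t => (t.1.length : Int)) (fun t => t.1) false).map (·.2)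

-- ===== PRECONDITION & SPEC =====
-- Pre_ excludes (a) association lists with duplicate pid keys — no Python dict argument has them,
-- the assoc-list image of a dict is key-distinct — and (b) exactly the inputs where Python A
-- raises KeyError: root_pid is a key of snapshots and some row lacks a "ppid" key.
def Pre_descendant_pids_py (root_pid : Int) (snapshots : List (Int × List (String × Int))) : Prop :=
  (snapshots.map (·.1)).Nodup ∧
  ((PySem.Dict.mk snapshots).contains root_pid = true →
    ∀ pr ∈ snapshots, 1 ≤ (PySem.Dict.mk pr.2).keys.count "ppid")
instance (root_pid : Int) (snapshots : List (Int × List (String × Int))) : Decidable (Pre_descendant_pids_py root_pid snapshots) := by unfold Pre_descendant_pids_py; infer_instance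

def pvWitness_descendant_pids_py : Int × (List (Int × List (String × Int))) :=
  (1, [(1, [("ppid", 0)]), (2, [("ppid", 1)]), (3, [("ppid", 1)])])

def Spec_descendant_pids_py (root_pid : Int) (snapshots : List (Int × List (String × Int))) (out : List Int) : Prop := out = descendant_pids_py_alt root_pid snapshots
instance (root_pid : Int) (snapshots : List (Int × List (String × Int))) (out : List Int) : Decidable (Spec_descendant_pids_py root_pid snapshots out) := by unfold Spec_descendant_pids_py; infer_instance

-- ===== CLAIM (what is proved, stated in full; the proofs are below) =====
def Claim_equal_descendant_pids_py : Prop := ∀ (root_pid : Int) (snapshots : List (Int × List (String × Int))), Dom_descendant_pids_py root_pid snapshots → Pre_descendant_pids_py root_pid snapshots → Spec_descendant_pids_py root_pid snapshots (descendant_pids_py root_pid snapshots)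

-- ===== LEMMAS AND PROOFS =====

-- ---- proof-side abbreviations ----

-- int(row["ppid"]) as a total function (used only where the row is known to carry "ppid")
def pvPP (pr : Int × List (String × Int)) : Int := (PySem.Dict.mk pr.2).getD "ppid" 0

-- the parent map and the sorted-children map of the two ports, as functions
def pvP (snapshots : List (Int × List (String × Int))) : Int → Option Int :=
  fun v => (pvParent (PySem.Dict.mk snapshots)).get? v

def pvC (snapshots : List (Int × List (String × Int))) (u : Int) : List Int :=
  PySem.List.sorted ((pvChildren (PySem.Dict.mk snapshots)).getD u []) (fun x => x) false

-- "p is the path of pids from (below) root down to v" in the parent graph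
inductive pvIsKey (P : Int → Option Int) (root : Int) : Int → List Int → Prop
  | root : pvIsKey P root root []
  | step {u v : Int} {p : List Int} :
      pvIsKey P root u p → P v = some u → v ≠ root → pvIsKey P root v (p ++ [v])

-- shortlex: the order of B's sort key (len(path), path); also the BFS emission order
def pvSL (p q : List Int) : Prop := p.length < q.length ∨ (p.length = q.length ∧ p < q)

-- remaining potential: rows whose parent has not been expanded yet (fuel accounting for A's loop)
def pvTP (snapshots : List (Int × List (String × Int))) (seen : PySem.Set Int) : Nat :=
  (snapshots.filter (fun pr => !(PySem.Set.contains seen (pvPP pr)))).length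

-- ambient facts available in the non-trivial branch (Pre_ + root present)
def pvCtx (root : Int) (snapshots : List (Int × List (String × Int))) : Prop :=
  (snapshots.map (·.1)).Nodup ∧
  (∀ pr ∈ snapshots, (PySem.Dict.mk pr.2).contains "ppid" = true) ∧
  (PySem.Dict.mk snapshots).contains root = true

-- ---- list-lex facts ----

theorem pvLex_append_same (p : List Int) (a b : Int) (h : a < b) : p ++ [a] < p ++ [b] := by
  refine (List.lt_iff_lex_lt _ _).mpr ?_
  induction p with
  | nil => exact List.Lex.rel h
  | cons x p ih => exact List.Lex.cons ih

theorem pvLex_append_len (p q : List Int) (a b : Int) (hl : p.length = q.length) (h : p < q) :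
    p ++ [a] < q ++ [b] := by
  refine (List.lt_iff_lex_lt _ _).mpr ?_
  replace h := (List.lt_iff_lex_lt _ _).mp h
  induction h with
  | nil => simp at hl
  | rel h => exact List.Lex.rel h
  | cons h ih => exact List.Lex.cons (ih (by simpa using hl))

theorem pvSL_trans (p q r : List Int) (h1 : pvSL p q) (h2 : pvSL q r) : pvSL p r := by
  rcases h1 with h1 | ⟨e1, l1⟩ <;> rcases h2 with h2 | ⟨e2, l2⟩
  · exact Or.inl (by omega)
  · exact Or.inl (by omega)
  · exact Or.inl (by omega)
  · exact Or.inr ⟨by omega, lt_trans l1 l2⟩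

theorem pvSL_asymm (p q : List Int) (h1 : pvSL p q) : ¬ pvSL q p := by
  rintro (h2 | ⟨e2, l2⟩) <;> rcases h1 with h1 | ⟨e1, l1⟩
  · omega
  · omega
  · omega
  · exact lt_asymm l1 l2

theorem pvSL_ext (p : List Int) (a : Int) : pvSL p (p ++ [a]) := by
  exact Or.inl (by simp)

theorem pvSL_append (p q : List Int) (a b : Int) (h : pvSL p q) : pvSL (p ++ [a]) (q ++ [b]) := by
  rcases h with h | ⟨e, l⟩
  · exact Or.inl (by simp; omega)
  · exact Or.inr ⟨by simp [e], pvLex_append_len p q a b e l⟩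

theorem pvSL_same (p : List Int) (a b : Int) (h : a < b) : pvSL (p ++ [a]) (p ++ [b]) := by
  exact Or.inr ⟨by simp, pvLex_append_same p a b h⟩

-- ---- facts about keys ----

theorem pvIsKey_last {P : Int → Option Int} {root v : Int} {p : List Int}
    (h : pvIsKey P root v p) : (p = [] ∧ v = root) ∨ p.getLast? = some v := by
  cases h with
  | root => exact Or.inl ⟨rfl, rfl⟩
  | step _ _ _ => exact Or.inr List.getLast?_concat

theorem pvIsKey_unique {P : Int → Option Int} {root v : Int} {p q : List Int}
    (h1 : pvIsKey P root v p) (h2 : pvIsKey P root v q) : p = q := by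
  induction h1 generalizing q with
  | root =>
    cases h2 with
    | root => rfl
    | step _ _ hne => exact absurd rfl hne
  | step hu hP hne ih =>
    cases h2 with
    | root => exact absurd rfl hne
    | step hu' hP' _ =>
      rw [hP] at hP'
      cases hP'
      rw [ih hu']

theorem pvIsKey_node {P : Int → Option Int} {root v w : Int} {p : List Int}
    (h1 : pvIsKey P root v p) (h2 : pvIsKey P root w p) : v = w := by
  rcases pvIsKey_last h1 with ⟨hp, hv⟩ | hv <;> rcases pvIsKey_last h2 with ⟨hq, hw⟩ | hw
  · rw [hv, hw]
  · rw [hp] at hw; simp at hw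
  · rw [hq] at hv; simp at hv
  · rw [hv] at hw; injection hw

theorem pvIsKey_prefix {P : Int → Option Int} {root v : Int} {p q : List Int} {c : Int}
    (h : pvIsKey P root v p) (hpre : q ++ [c] <+: p) : pvIsKey P root c (q ++ [c]) := by
  induction h generalizing q c with
  | root => simp at hpre
  | step hu hP hne ih =>
    rcases List.prefix_concat_iff.mp hpre with heq | hpre'
    · rcases List.append_inj' heq rfl with ⟨hq, hc⟩
      injection hc with hc
      rw [hq, hc]
      exact pvIsKey.step hu hP hne
    · exact ih hpre'

theorem pvIsKey_mem {P : Int → Option Int} {root v : Int} {p : List Int}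
    (h : pvIsKey P root v p) : ∀ c ∈ p, c ≠ root ∧ (P c).isSome := by
  induction h with
  | root => intro c hc; simp at hc
  | step hu hP hne ih =>
    intro c hc
    rcases List.mem_append.mp hc with hc | hc
    · exact ih c hc
    · rcases List.mem_singleton.mp hc with rfl
      exact ⟨hne, by rw [hP]; rfl⟩

theorem pvIsKey_nodup {P : Int → Option Int} {root v : Int} {p : List Int}
    (h : pvIsKey P root v p) : p.Nodup := by
  induction h with
  | root => exact List.nodup_nil
  | @step u v p hu hP hne ih =>
    refine List.Nodup.append ih (List.nodup_singleton v) ?_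
    intro x hx hx'
    rcases List.mem_singleton.mp hx' with rfl
    rcases List.append_of_mem hx with ⟨l1, l2, rfl⟩
    have hk1 : pvIsKey P root x (l1 ++ [x]) :=
      pvIsKey_prefix (pvIsKey.step hu hP hne)
        ⟨l2 ++ [x], by simp⟩
    have hk2 : pvIsKey P root x ((l1 ++ x :: l2) ++ [x]) := pvIsKey.step hu hP hne
    have := pvIsKey_unique hk1 hk2
    have : (l1 ++ [x]).length = ((l1 ++ x :: l2) ++ [x]).length := by rw [this]
    simp at this

theorem pvIsKey_inv {P : Int → Option Int} {root v : Int} {p : List Int}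
    (h : pvIsKey P root v p) (hne : p ≠ []) :
    ∃ u q, p = q ++ [v] ∧ P v = some u ∧ pvIsKey P root u q := by
  cases h with
  | root => exact absurd rfl hne
  | step hu hP hvne => exact ⟨_, _, rfl, hP, hu⟩

-- seconds of a strictly shortlex-increasing keyed list are distinct
theorem pvKeyedNodup {P : Int → Option Int} {root : Int} (L : List (List Int × Int))
    (hk : ∀ e ∈ L, pvIsKey P root e.2 e.1) (hpw : (L.map (·.1)).Pairwise pvSL) :
    (L.map (·.2)).Nodup := by
  induction L with
  | nil => exact List.nodup_nil
  | cons e L ih =>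
    rw [List.map_cons, List.nodup_cons]
    rw [List.map_cons, List.pairwise_cons] at hpw
    refine ⟨?_, ih (fun x hx => hk x (List.mem_cons_of_mem e hx)) hpw.2⟩
    intro hmem
    rcases List.mem_map.mp hmem with ⟨e', he', hee⟩
    have hkey : e.1 = e'.1 := by
      refine pvIsKey_unique (hk e (List.mem_cons_self)) ?_
      rw [← hee]
      exact hk e' (List.mem_cons_of_mem e he')
    have hsl := hpw.1 e'.1 (List.mem_map_of_mem he')
    rw [hkey] at hsl
    exact pvSL_asymm _ _ hsl hsl

-- ---- context facts: what the two builds compute ----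

theorem pvRowPpid_eq {pr : Int × List (String × Int)}
    (hcont : (PySem.Dict.mk pr.2).contains "ppid" = true) : pvRowPpid? pr.2 = some (pvPP pr) := by
  have hsome : ((PySem.Dict.mk pr.2).get? "ppid").isSome := by
    rw [← PySem.Dict.contains_eq_isSome_get?]; exact hcont
  rcases Option.isSome_iff_exists.mp hsome with ⟨x, hx⟩
  unfold pvRowPpid? pvPP
  rw [PySem.Dict.getD_eq_get?_getD, hx]
  rfl


theorem pvCtx_bucket {root : Int} {snapshots : List (Int × List (String × Int))}
    (h : pvCtx root snapshots) (u : Int) :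
    (pvChildren (PySem.Dict.mk snapshots)).getD u [] =
      (snapshots.filter (fun pr => pvPP pr == u)).map (·.1) := by
  unfold pvChildren
  have hitems : (PySem.Dict.mk snapshots).items = snapshots := rfl
  rw [hitems]
  rw [PySem.List.foldl_congr_mem snapshots _
    (fun d pr => d.modify (pvPP pr) [] (· ++ [pr.1])) PySem.Dict.empty
    (fun acc pr hpr => by rw [pvRowPpid_eq (h.2.1 pr hpr)])]
  have hmain := PySem.Dict.getD_foldl_modify_append
      (snapshots.map (fun pr => (pvPP pr, pr.1))) PySem.Dict.empty u
  rw [List.foldl_map] at hmain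
  refine Eq.trans ?_ (hmain.trans ?_)
  · rfl
  · simp [List.filter_map, Function.comp_def]

theorem pvCtx_pm_items {root : Int} {snapshots : List (Int × List (String × Int))}
    (h : pvCtx root snapshots) :
    (pvParent (PySem.Dict.mk snapshots)).items = snapshots.map (fun pr => (pr.1, pvPP pr)) := by
  unfold pvParent
  have hitems : (PySem.Dict.mk snapshots).items = snapshots := rfl
  rw [hitems]
  rw [PySem.List.foldl_congr_mem snapshots _
    (fun d pr => d.insert pr.1 (pvPP pr)) PySem.Dict.empty
    (fun acc pr hpr => by rw [pvRowPpid_eq (h.2.1 pr hpr)])]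
  rw [PySem.Dict.items_foldl_insert_fresh snapshots (fun pr => pr.1) pvPP PySem.Dict.empty
    (fun a _ => rfl) h.1]
  rfl

theorem pvCtx_keys {root : Int} {snapshots : List (Int × List (String × Int))}
    (h : pvCtx root snapshots) :
    (pvParent (PySem.Dict.mk snapshots)).keys = snapshots.map (·.1) := by
  show (pvParent (PySem.Dict.mk snapshots)).items.map (·.1) = _
  rw [pvCtx_pm_items h, List.map_map]
  rfl

theorem pvCtx_P_iff {root : Int} {snapshots : List (Int × List (String × Int))}
    (h : pvCtx root snapshots) (v u : Int) :
    pvP snapshots v = some u ↔ ∃ pr ∈ snapshots, pr.1 = v ∧ pvPP pr = u := by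
  unfold pvP
  have hnd : (pvParent (PySem.Dict.mk snapshots)).keys.Nodup := by
    rw [pvCtx_keys h]; exact h.1
  rw [PySem.Dict.get?_eq_some_iff_mem_items _ _ _ hnd, pvCtx_pm_items h]
  simp [Prod.ext_iff]

theorem pvCtx_memC {root : Int} {snapshots : List (Int × List (String × Int))}
    (h : pvCtx root snapshots) (u v : Int) :
    v ∈ pvC snapshots u ↔ pvP snapshots v = some u := by
  unfold pvC
  rw [PySem.List.mem_sorted, pvCtx_bucket h, pvCtx_P_iff h]
  simp only [List.mem_map, List.mem_filter, beq_iff_eq]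
  constructor
  · rintro ⟨pr, ⟨hpr, hu⟩, hv⟩; exact ⟨pr, hpr, hv, hu⟩
  · rintro ⟨pr, hpr, hv, hu⟩; exact ⟨pr, ⟨hpr, hu⟩, hv⟩

theorem pvCtx_pairC {root : Int} {snapshots : List (Int × List (String × Int))}
    (h : pvCtx root snapshots) (u : Int) : (pvC snapshots u).Pairwise (· < ·) := by
  unfold pvC
  have hnd : ((pvChildren (PySem.Dict.mk snapshots)).getD u []).Nodup := by
    rw [pvCtx_bucket h]
    exact (h.1.sublist (List.Sublist.map _ List.filter_sublist))
  have hnd' := ((PySem.List.sorted_perm ((pvChildren (PySem.Dict.mk snapshots)).getD u [])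
    (fun x => x) false).nodup_iff).mpr hnd
  have hle := PySem.List.sorted_pairwise ((pvChildren (PySem.Dict.mk snapshots)).getD u [])
    (fun x => x)
  exact (hle.and hnd').imp (fun hab => lt_of_le_of_ne hab.1 hab.2)

theorem pvCtx_key_len {root : Int} {snapshots : List (Int × List (String × Int))}
    (h : pvCtx root snapshots) {v : Int} {p : List Int}
    (hk : pvIsKey (pvP snapshots) root v p) : p.length + 1 ≤ snapshots.length := by
  have hnd := pvIsKey_nodup hk
  have hmem := pvIsKey_mem hk
  have hroot : root ∈ snapshots.map (·.1) := by
    have := (PySem.Dict.contains_iff_mem_keys (PySem.Dict.mk snapshots) root).mp h.2.2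
    simpa using this
  have hsub : p ⊆ (snapshots.map (·.1)).erase root := by
    intro c hc
    rcases hmem c hc with ⟨hne, hs⟩
    rcases Option.isSome_iff_exists.mp hs with ⟨u, hu⟩
    rcases (pvCtx_P_iff h c u).mp hu with ⟨pr, hpr, hc1, _⟩
    refine (List.mem_erase_of_ne hne).mpr ?_
    exact hc1 ▸ List.mem_map_of_mem hpr
  have hle := (hnd.subperm hsub).length_le
  have hlen := List.length_erase_of_mem hroot
  have hpos : 0 < (snapshots.map (·.1)).length := List.length_pos_of_mem hroot
  simp only [List.length_map] at hle hlen hpos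
  omega

theorem pvContains_add (s : PySem.Set Int) (v x : Int) :
    PySem.Set.contains (PySem.Set.add s v) x = (PySem.Set.contains s x || x == v) := by
  rw [Bool.eq_iff_iff]
  simp [PySem.Set.mem_add, Bool.or_eq_true, beq_iff_eq]

theorem pvTP_split (l : List (Int × List (String × Int))) (seen : PySem.Set Int) (v : Int)
    (hv : PySem.Set.contains seen v = false) :
    (l.filter (fun pr => !(PySem.Set.contains seen (pvPP pr)))).length
      = (l.filter (fun pr => pvPP pr == v)).length
        + (l.filter (fun pr => !(PySem.Set.contains (PySem.Set.add seen v) (pvPP pr)))).length := by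
  induction l with
  | nil => rfl
  | cons pr l ih =>
    by_cases hb : pvPP pr = v
    · have h2 : PySem.Set.contains (PySem.Set.add seen v) (pvPP pr) = true := by
        rw [pvContains_add]
        simp [hb]
      have h1 : PySem.Set.contains seen (pvPP pr) = false := by rw [hb]; exact hv
      have hb' : (pvPP pr == v) = true := by simpa using hb
      simp only [List.filter_cons, h1, h2, hb', Bool.not_false, Bool.not_true,
        eq_self_iff_true, Bool.false_eq_true, if_true, if_false, List.length_cons]
      omega
    · have hb' : (pvPP pr == v) = false := by simpa using hb
      have h2 : PySem.Set.contains (PySem.Set.add seen v) (pvPP pr)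
          = PySem.Set.contains seen (pvPP pr) := by
        rw [pvContains_add, hb', Bool.or_false]
      rcases Bool.eq_false_or_eq_true (PySem.Set.contains seen (pvPP pr)) with hf | ht
      · simp only [List.filter_cons, h2, hf, hb', Bool.not_false, Bool.not_true,
          eq_self_iff_true, Bool.false_eq_true, if_true, if_false, List.length_cons]
        omega
      · simp only [List.filter_cons, h2, ht, hb', Bool.not_false, Bool.not_true,
          eq_self_iff_true, Bool.false_eq_true, if_true, if_false, List.length_cons]
        omega

theorem pvCtx_TP_add {root : Int} {snapshots : List (Int × List (String × Int))}
    (h : pvCtx root snapshots) (seen : PySem.Set Int) (v : Int)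
    (hv : PySem.Set.contains seen v = false) :
    pvTP snapshots seen = (pvC snapshots v).length + pvTP snapshots (PySem.Set.add seen v) := by
  have hCv : (pvC snapshots v).length = (snapshots.filter (fun pr => pvPP pr == v)).length := by
    unfold pvC
    rw [PySem.List.length_sorted, pvCtx_bucket h, List.length_map]
  rw [hCv]
  unfold pvTP
  exact pvTP_split snapshots seen v hv

-- ---- the walk of B computes exactly the keys ----

theorem pvWalk_complete {root : Int} {snapshots : List (Int × List (String × Int))}
    (hc : pvCtx root snapshots) {v : Int} {p : List Int}
    (hk : pvIsKey (pvP snapshots) root v p) (s : Nat) (hs : p.length ≤ s) (acc : List Int) :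
    pvWalk (pvParent (PySem.Dict.mk snapshots)) root s v acc =
      (acc ++ (p.reverse ++ [root]).tail, root) := by
  induction hk generalizing s acc with
  | root =>
    cases s with
    | zero => simp [pvWalk]
    | succ s => simp [pvWalk]
  | @step u v p hu hP hne ih =>
    cases s with
    | zero => simp at hs
    | succ s =>
      have hvroot : (v == root) = false := by simpa using hne
      have hget : (pvParent (PySem.Dict.mk snapshots)).get? v = some u := hP
      simp only [pvWalk, hvroot, Bool.false_eq_true, if_false, hget]
      have hs' : p.length ≤ s := by simp at hs; omega
      rw [ih s hs' (acc ++ [u])]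
      rcases pvIsKey_last hu with ⟨hp0, hu0⟩ | hlast
      · subst hp0; subst hu0
        simp
      · rcases List.eq_nil_or_concat p with rfl | ⟨p', u', rfl⟩
        · simp at hlast
        · rw [List.concat_eq_append, List.getLast?_concat] at hlast
          injection hlast with hlast
          subst hlast
          simp

theorem pvWalk_sound {root : Int} {snapshots : List (Int × List (String × Int))}
    (hc : pvCtx root snapshots) (s : Nat) :
    ∀ (v : Int) (acc res : List Int),
      pvWalk (pvParent (PySem.Dict.mk snapshots)) root s v acc = (res, root) →
      ∃ p, pvIsKey (pvP snapshots) root v p := by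
  induction s with
  | zero =>
    intro v acc res hres
    simp only [pvWalk, Prod.mk.injEq] at hres
    exact ⟨[], hres.2 ▸ pvIsKey.root⟩
  | succ s ih =>
    intro v acc res hres
    by_cases hv : v = root
    · exact ⟨[], hv ▸ pvIsKey.root⟩
    · have hv' : (v == root) = false := by simpa using hv
      simp only [pvWalk, hv', Bool.false_eq_true, if_false] at hres
      cases hget : (pvParent (PySem.Dict.mk snapshots)).get? v with
      | none =>
        rw [hget] at hres
        simp only [Prod.mk.injEq] at hres
        exact absurd hres.2 hv
      | some nxt =>
        rw [hget] at hres
        rcases ih nxt (acc ++ [nxt]) res hres with ⟨q, hq⟩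
        exact ⟨q ++ [v], pvIsKey.step hq hget hv⟩

-- the chain of a key: p.reverse ++ [root] starts with its node
theorem pvChainShape {P : Int → Option Int} {root v : Int} {p : List Int}
    (hk : pvIsKey P root v p) : [v] ++ (p.reverse ++ [root]).tail = p.reverse ++ [root] := by
  rcases pvIsKey_last hk with ⟨hp0, hv0⟩ | hlast
  · subst hp0; subst hv0; simp
  · rcases List.eq_nil_or_concat p with rfl | ⟨p', u', rfl⟩
    · simp at hlast
    · rw [List.concat_eq_append, List.getLast?_concat] at hlast
      injection hlast with hlast
      subst hlast
      simp

-- a pid whose walk ends at root carries exactly its key as recorded entry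
theorem pvWalkEntry {root : Int} {snapshots : List (Int × List (String × Int))}
    (hc : pvCtx root snapshots) (pid : Int)
    (hcond : ((pvWalk (pvParent (PySem.Dict.mk snapshots)) root
      (pvParent (PySem.Dict.mk snapshots)).size pid [pid]).2 == root) = true) :
    ∃ p, pvIsKey (pvP snapshots) root pid p ∧
      (pvWalk (pvParent (PySem.Dict.mk snapshots)) root
        (pvParent (PySem.Dict.mk snapshots)).size pid [pid]).1.dropLast.reverse = p := by
  have hn : (pvParent (PySem.Dict.mk snapshots)).size = snapshots.length := by
    show (pvParent (PySem.Dict.mk snapshots)).items.length = _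
    rw [pvCtx_pm_items hc, List.length_map]
  have hc2 : (pvWalk (pvParent (PySem.Dict.mk snapshots)) root
      (pvParent (PySem.Dict.mk snapshots)).size pid [pid]).2 = root := by
    simpa using hcond
  have hres := (Prod.mk.eta (p := pvWalk (pvParent (PySem.Dict.mk snapshots)) root
      (pvParent (PySem.Dict.mk snapshots)).size pid [pid])).symm
  rw [hc2] at hres
  rcases pvWalk_sound hc _ pid [pid] _ hres with ⟨p, hp⟩
  refine ⟨p, hp, ?_⟩
  have hlen : p.length ≤ (pvParent (PySem.Dict.mk snapshots)).size := by
    rw [hn]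
    have := pvCtx_key_len hc hp
    omega
  have hwalk := pvWalk_complete hc hp _ hlen [pid]
  have h1 : (pvWalk (pvParent (PySem.Dict.mk snapshots)) root
      (pvParent (PySem.Dict.mk snapshots)).size pid [pid]).1
      = [pid] ++ (p.reverse ++ [root]).tail := congrArg Prod.fst hwalk
  rw [h1, pvChainShape hp]
  simp

theorem pvKeyed_mem {root : Int} {snapshots : List (Int × List (String × Int))}
    (hc : pvCtx root snapshots) (e : List Int × Int) :
    e ∈ pvKeyed (pvParent (PySem.Dict.mk snapshots)) root (pvParent (PySem.Dict.mk snapshots)).size ↔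
      pvIsKey (pvP snapshots) root e.2 e.1 := by
  obtain ⟨p, v⟩ := e
  show _ ∈ _ ↔ pvIsKey (pvP snapshots) root v p
  have hn : (pvParent (PySem.Dict.mk snapshots)).size = snapshots.length := by
    show (pvParent (PySem.Dict.mk snapshots)).items.length = _
    rw [pvCtx_pm_items hc, List.length_map]
  unfold pvKeyed
  rw [PySem.List.foldl_append_if
    (fun pid => (pvWalk (pvParent (PySem.Dict.mk snapshots)) root
      (pvParent (PySem.Dict.mk snapshots)).size pid [pid]).2 == root)
    (fun pid => ((pvWalk (pvParent (PySem.Dict.mk snapshots)) root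
      (pvParent (PySem.Dict.mk snapshots)).size pid [pid]).1.dropLast.reverse, pid))
    (pvParent (PySem.Dict.mk snapshots)).keys []]
  rw [List.nil_append]
  constructor
  · intro hmem
    rcases List.mem_map.mp hmem with ⟨pid, hpid, hentry⟩
    have hcond := (List.mem_filter.mp hpid).2
    rcases Prod.mk.injEq .. ▸ hentry with ⟨h1, h2⟩
    rcases pvWalkEntry hc pid hcond with ⟨q, hkq, hchain⟩
    show pvIsKey (pvP snapshots) root v p
    rw [← h2, ← h1, hchain]
    exact hkq
  · intro hk
    have hvmem : v ∈ (pvParent (PySem.Dict.mk snapshots)).keys := by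
      rw [pvCtx_keys hc]
      rcases pvIsKey_last hk with ⟨_, hv0⟩ | hlast
      · rw [hv0]
        have := (PySem.Dict.contains_iff_mem_keys (PySem.Dict.mk snapshots) root).mp hc.2.2
        simpa using this
      · rcases List.eq_nil_or_concat p with rfl | ⟨p', u', rfl⟩
        · simp at hlast
        · rw [List.concat_eq_append, List.getLast?_concat] at hlast
          injection hlast with hlast
          have hsome := (pvIsKey_mem hk v (by
            rw [List.concat_eq_append]
            exact List.mem_append_right p' (List.mem_singleton.mpr hlast.symm))).2
          rcases Option.isSome_iff_exists.mp hsome with ⟨u, hu⟩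
          rcases (pvCtx_P_iff hc _ _).mp hu with ⟨pr, hpr, hc1, _⟩
          exact hc1 ▸ List.mem_map_of_mem hpr
    have hlen : p.length ≤ (pvParent (PySem.Dict.mk snapshots)).size := by
      rw [hn]
      have := pvCtx_key_len hc hk
      omega
    have hwalk := pvWalk_complete hc hk _ hlen [v]
    have hcond : ((pvWalk (pvParent (PySem.Dict.mk snapshots)) root
        (pvParent (PySem.Dict.mk snapshots)).size v [v]).2 == root) = true := by
      rw [hwalk]
      simp
    refine List.mem_map.mpr ⟨v, List.mem_filter.mpr ⟨hvmem, hcond⟩, ?_⟩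
    rw [hwalk]
    show (([v] ++ (p.reverse ++ [root]).tail).dropLast.reverse, v) = (p, v)
    rw [pvChainShape hk]
    simp

theorem pvKeyed_nodup {root : Int} {snapshots : List (Int × List (String × Int))}
    (hc : pvCtx root snapshots) :
    ((pvKeyed (pvParent (PySem.Dict.mk snapshots)) root (pvParent (PySem.Dict.mk snapshots)).size).map (·.2)).Nodup := by
  unfold pvKeyed
  rw [PySem.List.foldl_append_if
    (fun pid => (pvWalk (pvParent (PySem.Dict.mk snapshots)) root
      (pvParent (PySem.Dict.mk snapshots)).size pid [pid]).2 == root)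
    (fun pid => ((pvWalk (pvParent (PySem.Dict.mk snapshots)) root
      (pvParent (PySem.Dict.mk snapshots)).size pid [pid]).1.dropLast.reverse, pid))
    (pvParent (PySem.Dict.mk snapshots)).keys []]
  rw [List.nil_append, List.map_map]
  have : ((fun x => x.2) ∘ (fun pid => ((pvWalk (pvParent (PySem.Dict.mk snapshots)) root
      (pvParent (PySem.Dict.mk snapshots)).size pid [pid]).1.dropLast.reverse, pid))) = id := rfl
  rw [this, List.map_id]
  refine List.Nodup.filter _ ?_
  rw [pvCtx_keys hc]
  exact hc.1

-- ---- the sort of B: sorted2 by (len, path) is the unique strictly shortlex-increasing rearrangement ----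

theorem pvSorted2_eq (xs ys : List (List Int × Int)) (hperm : ys.Perm xs)
    (hpw : ys.Pairwise (fun a b => pvSL a.1 b.1)) :
    PySem.List.sorted2 xs (fun t => (t.1.length : Int)) (fun t => t.1) false = ys := by
  have hbef : (fun (a b : List Int × Int) =>
        decide ((a.1.length : Int) < (b.1.length : Int)) ||
          (!decide ((b.1.length : Int) < (a.1.length : Int)) && decide (a.1 < b.1)))
      = (fun (a b : List Int × Int) =>
        decide (toLex (((a.1.length : Int), a.1) : Int × List Int)
          < toLex (((b.1.length : Int), b.1) : Int × List Int))) := by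
    funext a b
    by_cases h1 : (a.1.length : Int) < (b.1.length : Int)
    · simp [h1, Prod.Lex.lt_iff, asymm h1]
    · by_cases h2 : (b.1.length : Int) < (a.1.length : Int)
      · simp [h1, h2, Prod.Lex.lt_iff, (ne_of_lt h2).symm]
      · have he : (a.1.length : Int) = (b.1.length : Int) :=
          le_antisymm (not_lt.mp h2) (not_lt.mp h1)
      
        simp [h1, h2, Prod.Lex.lt_iff, he]
  have hkey : PySem.List.sorted2 xs (fun t => (t.1.length : Int)) (fun t => t.1) false
      = PySem.List.sorted xs
          (fun t => toLex (((t.1.length : Int), t.1) : Int × List Int)) false := by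
    show xs.foldl (fun acc x => PySem.List.insertBy (fun (a b : List Int × Int) =>
        decide ((a.1.length : Int) < (b.1.length : Int)) ||
          (!decide ((b.1.length : Int) < (a.1.length : Int)) && decide (a.1 < b.1))) x acc) []
      = xs.foldl (fun acc x => PySem.List.insertBy (fun (a b : List Int × Int) =>
        decide (toLex (((a.1.length : Int), a.1) : Int × List Int)
          < toLex (((b.1.length : Int), b.1) : Int × List Int))) x acc) []
    rw [hbef]
  rw [hkey]
  refine PySem.List.sorted_eq_of_perm_of_pairwise_lt xs ys _ hperm ?_
  refine hpw.imp ?_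
  intro a b hab
  rw [Prod.Lex.lt_iff]
  simp only [ofLex_toLex]
  rcases hab with h | ⟨e, l⟩
  · exact Or.inl (by exact_mod_cast h)
  · exact Or.inr ⟨by exact_mod_cast e, l⟩

-- ---- the main BFS invariant: A's loop emits the keyed pairs in shortlex order ----

theorem pvLoop_main {root : Int} {snapshots : List (Int × List (String × Int))}
    (hc : pvCtx root snapshots) :
    ∀ (fuel : Nat) (queue : List Int) (seen : PySem.Set Int) (KLo KLq : List (List Int × Int)),
      (∀ w, PySem.Set.contains seen w = true ↔ w ∈ KLo.map (·.2)) →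
      ([], root) ∈ KLo →
      (∀ e ∈ KLo ++ KLq, pvIsKey (pvP snapshots) root e.2 e.1) →
      ((KLo ++ KLq).map (·.1)).Pairwise pvSL →
      queue.filter (fun w => !(PySem.Set.contains seen w)) = KLq.map (·.2) →
      (∀ e ∈ KLq, ∃ pu u, (pu, u) ∈ KLo ∧ pvP snapshots e.2 = some u ∧ e.1 = pu ++ [e.2]) →
      (∀ t pt, pvIsKey (pvP snapshots) root t pt → (pt, t) ∈ KLo ∨ ∃ e ∈ KLq, e.1 <+: pt) →
      queue.length + pvTP snapshots seen ≤ fuel →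
      ∃ KL : List (List Int × Int),
        pvLoopA (pvChildren (PySem.Dict.mk snapshots)) fuel queue seen (KLo.map (·.2)) = KL.map (·.2) ∧
        (∀ e ∈ KL, pvIsKey (pvP snapshots) root e.2 e.1) ∧
        (KL.map (·.1)).Pairwise pvSL ∧
        (∀ t pt, pvIsKey (pvP snapshots) root t pt → (pt, t) ∈ KL) := by
  intro fuel
  induction fuel with
  | zero =>
    intro queue seen KLo KLq h1 h2 h3 h4 h5 h6 h7 h8
    cases queue with
    | nil =>
      have hklq : KLq = [] := by
        have h5n : KLq.map (·.2) = [] := by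
          rw [← h5]
          rfl
        exact List.map_eq_nil_iff.mp h5n
      subst hklq
      refine ⟨KLo, rfl, fun e he => h3 e (by simpa using he), by simpa using h4, ?_⟩
      intro t pt ht
      rcases h7 t pt ht with h | ⟨e, he, _⟩
      · exact h
      · simp at he
    | cons w rest => simp at h8
  | succ fuel ih =>
    intro queue seen KLo KLq h1 h2 h3 h4 h5 h6 h7 h8
    cases queue with
    | nil =>
      have hklq : KLq = [] := by
        have h5n : KLq.map (·.2) = [] := by
          rw [← h5]
          rfl
        exact List.map_eq_nil_iff.mp h5n
      subst hklq
      refine ⟨KLo, rfl, fun e he => h3 e (by simpa using he), by simpa using h4, ?_⟩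
      intro t pt ht
      rcases h7 t pt ht with h | ⟨e, he, _⟩
      · exact h
      · simp at he
    | cons w rest =>
      by_cases hw : PySem.Set.contains seen w = true
      · simp only [pvLoopA, hw, if_true]
        refine ih rest seen KLo KLq h1 h2 h3 h4 ?_ h6 h7 ?_
        · simp only [List.filter_cons] at h5
          rw [hw] at h5
          simp only [Bool.not_true, Bool.false_eq_true, if_false] at h5
          exact h5
        · simp only [List.length_cons] at h8
          omega
      · have hwf : PySem.Set.contains seen w = false := by simpa using hw
        have h5' : w :: rest.filter (fun x => !(PySem.Set.contains seen x)) = KLq.map (·.2) := by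
          simp only [List.filter_cons] at h5
          rw [hwf] at h5
          simp only [Bool.not_false, if_true] at h5
          exact h5
        cases KLq with
        | nil => simp at h5'
        | cons ehead KLq' =>
          obtain ⟨pw, w'⟩ := ehead
          have hw2 : w = w' := by
            have := congrArg (·.headI) h5'
            simpa using this
          subst hw2
          have hrestf : rest.filter (fun x => !(PySem.Set.contains seen x)) = KLq'.map (·.2) := by
            have := congrArg List.tail h5'
            simpa using this
          -- abbreviations
          have hkw : pvIsKey (pvP snapshots) root w pw :=
            h3 (pw, w) (List.mem_append_right _ List.mem_cons_self)
          have hrootmem : root ∈ KLo.map (·.2) := by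
            exact List.mem_map.mpr ⟨([], root), h2, rfl⟩
          have hrootseen : PySem.Set.contains seen root = true := (h1 root).mpr hrootmem
          have hwroot : w ≠ root := fun he => by rw [he, hrootseen] at hwf; cases hwf
          -- pairwise decompositions of h4
          have h4' : (KLo.map (·.1) ++ pw :: KLq'.map (·.1)).Pairwise pvSL := by
            simpa using h4
          have hcrossKLo : ∀ q ∈ KLo.map (·.1), pvSL q pw :=
            fun q hq => (List.pairwise_append.mp h4').2.2 q hq pw List.mem_cons_self
          have hcrossKLo' : ∀ q ∈ KLo.map (·.1), ∀ x ∈ KLq'.map (·.1), pvSL q x :=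
            fun q hq x hx => (List.pairwise_append.mp h4').2.2 q hq x (List.mem_cons_of_mem _ hx)
          have hpwKLq' : ∀ x ∈ KLq'.map (·.1), pvSL pw x :=
            fun x hx => (List.pairwise_cons.mp (List.pairwise_append.mp h4').2.1).1 x hx
          -- nodup of queue seconds
          have hqnodup : (((pw, w) :: KLq').map (·.2)).Nodup := by
            refine pvKeyedNodup _ (fun e he => h3 e (List.mem_append_right _ he)) ?_
            refine List.Pairwise.sublist ?_ h4
            rw [List.map_append]
            exact List.sublist_append_right _ _
          have hwnotin : w ∉ KLq'.map (·.2) := by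
            have h := hqnodup
            rw [List.map_cons] at h
            exact (List.nodup_cons.mp h).1
          -- children keys
          have hchildkey : ∀ c ∈ (pvC snapshots w).filter
              (fun c => !(PySem.Set.contains (PySem.Set.add seen w) c)),
              pvIsKey (pvP snapshots) root c (pw ++ [c]) := by
            intro c hcmem
            have hcC := (List.mem_filter.mp hcmem).1
            have hcuns := (List.mem_filter.mp hcmem).2
            have hcP : pvP snapshots c = some w := (pvCtx_memC hc w c).mp hcC
            have hcroot : c ≠ root := by
              intro he
              rw [he] at hcuns
              have : PySem.Set.contains (PySem.Set.add seen w) root = true := by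
                rw [pvContains_add, hrootseen]
                rfl
              rw [this] at hcuns
              cases hcuns
            exact pvIsKey.step hkw hcP hcroot
          -- step of the loop
          simp only [pvLoopA, hwf, Bool.false_eq_true, if_false]
          rw [show PySem.List.sorted ((pvChildren (PySem.Dict.mk snapshots)).getD w [])
              (fun x => x) false = pvC snapshots w from rfl]
          rw [show KLo.map (·.2) ++ [w] = (KLo ++ [(pw, w)]).map (·.2) by simp]
          refine ih (rest ++ pvC snapshots w) (PySem.Set.add seen w) (KLo ++ [(pw, w)])
            (KLq' ++ ((pvC snapshots w).filter
              (fun c => !(PySem.Set.contains (PySem.Set.add seen w) c))).map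
              (fun c => (pw ++ [c], c))) ?_ ?_ ?_ ?_ ?_ ?_ ?_ ?_
          -- i1
          · intro x
            rw [pvContains_add]
            rw [Bool.or_eq_true, h1 x]
            simp [beq_iff_eq]
          -- i2
          · exact List.mem_append_left _ h2
          -- i3
          · intro e he
            rcases List.mem_append.mp he with he | he
            · rcases List.mem_append.mp he with he | he
              · exact h3 e (List.mem_append_left _ he)
              · rcases List.mem_singleton.mp he with rfl
                exact hkw
            · rcases List.mem_append.mp he with he | he
              · exact h3 e (List.mem_append_right _ (List.mem_cons_of_mem _ he))
              · rcases List.mem_map.mp he with ⟨c, hcmem, rfl⟩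
                exact hchildkey c hcmem
          -- i4
          · rw [show ((KLo ++ [(pw, w)]) ++ (KLq' ++ ((pvC snapshots w).filter
                (fun c => !(PySem.Set.contains (PySem.Set.add seen w) c))).map
                (fun c => (pw ++ [c], c)))).map (·.1)
              = (KLo ++ (pw, w) :: KLq').map (·.1) ++ (((pvC snapshots w).filter
                (fun c => !(PySem.Set.contains (PySem.Set.add seen w) c))).map
                (fun c => (pw ++ [c], c))).map (·.1) by simp]
            rw [List.pairwise_append]
            refine ⟨h4, ?_, ?_⟩
            · rw [List.map_map]
              refine List.Pairwise.map _ ?_ (List.Pairwise.filter _ (pvCtx_pairC hc w))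
              intro a b hab
              exact pvSL_same pw a b hab
            · intro x hx y hy
              rcases List.mem_map.mp hy with ⟨e2, he2, rfl⟩
              rcases List.mem_map.mp he2 with ⟨c, _, rfl⟩
              rw [List.map_append] at hx
              rcases List.mem_append.mp hx with hx | hx
              · exact pvSL_trans _ _ _ (hcrossKLo x hx) (pvSL_ext pw c)
              · rcases List.mem_cons.mp hx with rfl | hx
                · exact pvSL_ext x c
                · rcases List.mem_map.mp hx with ⟨e3, he3, rfl⟩
                  rcases h6 e3 (List.mem_cons_of_mem _ he3) with ⟨pu, u, hpu, _, he31⟩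
                  rw [he31]
                  refine pvSL_append pu pw e3.2 c ?_
                  exact hcrossKLo pu (List.mem_map.mpr ⟨(pu, u), hpu, rfl⟩)
          -- i5
          · rw [List.filter_append]
            have hrest2 : rest.filter (fun x => !(PySem.Set.contains (PySem.Set.add seen w) x))
                = KLq'.map (·.2) := by
              have hcong : ∀ x ∈ rest,
                  (!(PySem.Set.contains (PySem.Set.add seen w) x))
                    = ((!(x == w)) && (!(PySem.Set.contains seen x))) := by
                intro x _
                rw [pvContains_add, Bool.not_or, Bool.and_comm]
              rw [List.filter_congr hcong, ← List.filter_filter, hrestf]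
              refine List.filter_eq_self.mpr ?_
              intro x hx
              cases hbeq : (x == w) with
              | false => rfl
              | true => exact absurd ((beq_iff_eq.mp hbeq) ▸ hx) hwnotin
            rw [hrest2, List.map_append]
            congr 1
            rw [List.map_map]
            rw [show ((fun (x : List Int × Int) => x.2) ∘ (fun c => (pw ++ [c], c)))
              = fun c => c from rfl]
            rw [List.map_id']
          -- i6
          · intro e he
            rcases List.mem_append.mp he with he | he
            · rcases h6 e (List.mem_cons_of_mem _ he) with ⟨pu, u, hpu, hP, he1⟩
              exact ⟨pu, u, List.mem_append_left _ hpu, hP, he1⟩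
            · rcases List.mem_map.mp he with ⟨c, hcmem, rfl⟩
              refine ⟨pw, w, List.mem_append_right _ (List.mem_singleton.mpr rfl), ?_, rfl⟩
              exact (pvCtx_memC hc w c).mp (List.mem_filter.mp hcmem).1
          -- i7
          · intro t pt ht
            rcases h7 t pt ht with hmem | ⟨e, he, hpre⟩
            · exact Or.inl (List.mem_append_left _ hmem)
            · rcases List.mem_cons.mp he with rfl | he
              · -- e = (pw, w)
                by_cases hpt : pt = pw
                · subst hpt
                  have : t = w := pvIsKey_node ht hkw
                  subst this
                  exact Or.inl (List.mem_append_right _ (List.mem_singleton.mpr rfl))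
                · obtain ⟨t2, ht2⟩ := hpre
                  cases t2 with
                  | nil => exact absurd (by simpa using ht2.symm) hpt
                  | cons c0 tl =>
                    have hpre2 : pw ++ [c0] <+: pt := ⟨tl, by rw [← ht2]; simp⟩
                    have hkc0 : pvIsKey (pvP snapshots) root c0 (pw ++ [c0]) :=
                      pvIsKey_prefix ht hpre2
                    rcases pvIsKey_inv hkc0 (by simp) with ⟨u0, q0, heq, hP0, hu0⟩
                    have hq0 : q0 = pw := by
                      have := heq.symm
                      have hlen : q0.length = pw.length := by
                        have := congrArg List.length heq
                        simp at this
                        omega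
                      rcases List.append_inj heq.symm (by omega) with ⟨h9, _⟩
                      exact h9
                    rw [hq0] at hu0
                    have hu0w : u0 = w := pvIsKey_node hu0 hkw
                    rw [hu0w] at hP0
                    have hc0C : c0 ∈ pvC snapshots w := (pvCtx_memC hc w c0).mpr hP0
                    have hc0w : c0 ≠ w := by
                      intro he
                      have hq := pvIsKey_unique (he ▸ hkc0) hkw
                      have := congrArg List.length hq
                      simp at this
                    have hc0uns : (!(PySem.Set.contains (PySem.Set.add seen w) c0)) = true := by
                      rw [pvContains_add]
                      have hcseen : PySem.Set.contains seen c0 = false := by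
                        rcases Bool.eq_false_or_eq_true (PySem.Set.contains seen c0) with ht | hf
                        · exfalso
                          have hc0mem := (h1 c0).mp ht
                          rcases List.mem_map.mp hc0mem with ⟨e0, he0, he02⟩
                          have hk0 : pvIsKey (pvP snapshots) root c0 e0.1 :=
                            he02 ▸ h3 e0 (List.mem_append_left _ he0)
                          have he01 : e0.1 = pw ++ [c0] := pvIsKey_unique hk0 hkc0
                          have hsl := hcrossKLo e0.1 (List.mem_map.mpr ⟨e0, he0, rfl⟩)
                          rw [he01] at hsl
                          exact pvSL_asymm _ _ (pvSL_ext pw c0) hsl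
                        · exact hf
                      rw [hcseen]
                      have hbeq : (c0 == w) = false := by simpa using hc0w
                      rw [hbeq]
                      rfl
                    refine Or.inr ⟨(pw ++ [c0], c0), ?_, hpre2⟩
                    refine List.mem_append_right _ ?_
                    exact List.mem_map.mpr ⟨c0, List.mem_filter.mpr ⟨hc0C, hc0uns⟩, rfl⟩
              · exact Or.inr ⟨e, List.mem_append_left _ he, hpre⟩
          -- i8
          · have htp := pvCtx_TP_add hc seen w hwf
            simp only [List.length_append, List.length_cons] at h8 ⊢
            omega


-- ===== VERDICT (by name: the statement is the Claim_ definition above) =====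
theorem descendant_pids_py_spec : Claim_equal_descendant_pids_py := by
  intro root_pid snapshots _ hpre
  unfold Spec_descendant_pids_py descendant_pids_py descendant_pids_py_alt
  by_cases hroot : (PySem.Dict.mk snapshots).contains root_pid = false
  · simp [hroot]
  · have hcontains : (PySem.Dict.mk snapshots).contains root_pid = true := by
      simpa using hroot
    have hc : pvCtx root_pid snapshots := by
      refine ⟨hpre.1, ?_, hcontains⟩
      intro pr hpr
      have hcnt := hpre.2 hcontains pr hpr
      have hmem : "ppid" ∈ (PySem.Dict.mk pr.2).keys := by
        have := List.count_pos_iff.mp (by omega : 0 < (PySem.Dict.mk pr.2).keys.count "ppid")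
        exact this
      exact (PySem.Dict.contains_iff_mem_keys _ _).mpr hmem
    simp only [hcontains, Bool.true_eq_false, if_false]
    have hce : PySem.Set.contains PySem.Set.empty root_pid = false := rfl
    -- unfold the first iteration of A's loop: pop the root
    simp only [pvLoopA, hce, Bool.false_eq_true, if_false, List.nil_append]
    -- the eight invariants of the state after popping the root
    have hi1 : ∀ x, PySem.Set.contains (PySem.Set.add PySem.Set.empty root_pid) x = true ↔
        x ∈ ([(([] : List Int), root_pid)].map (·.2)) := by
      intro x
      rw [pvContains_add]
      have hcex : PySem.Set.contains PySem.Set.empty x = false := rfl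
      rw [hcex]
      simp [beq_iff_eq]
    have hi2 : (([] : List Int), root_pid) ∈ [(([] : List Int), root_pid)] :=
      List.mem_singleton.mpr rfl
    have hi3 : ∀ e ∈ [(([] : List Int), root_pid)] ++ (((pvC snapshots root_pid).filter
        (fun c => !(PySem.Set.contains (PySem.Set.add PySem.Set.empty root_pid) c))).map
        (fun c => (([] : List Int) ++ [c], c))),
        pvIsKey (pvP snapshots) root_pid e.2 e.1 := by
      intro e he
      rcases List.mem_append.mp he with he | he
      · rcases List.mem_singleton.mp he with rfl
        exact pvIsKey.root
      · rcases List.mem_map.mp he with ⟨c, hcmem, rfl⟩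
        have hcC := (List.mem_filter.mp hcmem).1
        have hcuns := (List.mem_filter.mp hcmem).2
        have hcP : pvP snapshots c = some root_pid := (pvCtx_memC hc root_pid c).mp hcC
        have hcroot : c ≠ root_pid := by
          intro he2
          rw [pvContains_add, he2] at hcuns
          simp at hcuns
        exact pvIsKey.step pvIsKey.root hcP hcroot
    have hi4 : (([(([] : List Int), root_pid)] ++ (((pvC snapshots root_pid).filter
        (fun c => !(PySem.Set.contains (PySem.Set.add PySem.Set.empty root_pid) c))).map
        (fun c => (([] : List Int) ++ [c], c)))).map (·.1)).Pairwise pvSL := by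
      rw [List.map_append]
      rw [List.pairwise_append]
      refine ⟨by simp, ?_, ?_⟩
      · rw [List.map_map]
        refine List.Pairwise.map _ ?_ (List.Pairwise.filter _ (pvCtx_pairC hc root_pid))
        intro a b hab
        exact pvSL_same [] a b hab
      · intro x hx y hy
        rcases List.mem_map.mp hy with ⟨e2, he2, rfl⟩
        rcases List.mem_map.mp he2 with ⟨c, _, rfl⟩
        have hx0 : x = [] := by simpa using hx
        rw [hx0]
        exact pvSL_ext [] c
    have hi5 : (PySem.List.sorted ((pvChildren (PySem.Dict.mk snapshots)).getD root_pid [])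
          (fun x => x) false).filter
          (fun x => !(PySem.Set.contains (PySem.Set.add PySem.Set.empty root_pid) x))
        = (((pvC snapshots root_pid).filter
          (fun c => !(PySem.Set.contains (PySem.Set.add PySem.Set.empty root_pid) c))).map
          (fun c => (([] : List Int) ++ [c], c))).map (·.2) := by
      show (pvC snapshots root_pid).filter _ = _
      rw [List.map_map]
      rw [show ((fun (x : List Int × Int) => x.2) ∘ (fun c => (([] : List Int) ++ [c], c)))
        = fun c => c from rfl]
      rw [List.map_id']
    have hi6 : ∀ e ∈ (((pvC snapshots root_pid).filter
        (fun c => !(PySem.Set.contains (PySem.Set.add PySem.Set.empty root_pid) c))).map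
        (fun c => (([] : List Int) ++ [c], c))),
        ∃ pu u, (pu, u) ∈ [(([] : List Int), root_pid)] ∧ pvP snapshots e.2 = some u ∧
          e.1 = pu ++ [e.2] := by
      intro e he
      rcases List.mem_map.mp he with ⟨c, hcmem, rfl⟩
      exact ⟨[], root_pid, List.mem_singleton.mpr rfl,
        (pvCtx_memC hc root_pid c).mp (List.mem_filter.mp hcmem).1, rfl⟩
    have hi7 : ∀ t pt, pvIsKey (pvP snapshots) root_pid t pt →
        (pt, t) ∈ [(([] : List Int), root_pid)] ∨
        ∃ e ∈ (((pvC snapshots root_pid).filter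
          (fun c => !(PySem.Set.contains (PySem.Set.add PySem.Set.empty root_pid) c))).map
          (fun c => (([] : List Int) ++ [c], c))), e.1 <+: pt := by
      intro t pt ht
      cases pt with
      | nil =>
        have : t = root_pid := pvIsKey_node ht pvIsKey.root
        exact Or.inl (List.mem_singleton.mpr (by rw [this]))
      | cons c0 tl =>
        have hpre2 : ([] : List Int) ++ [c0] <+: c0 :: tl := ⟨tl, by simp⟩
        have hkc0 : pvIsKey (pvP snapshots) root_pid c0 (([] : List Int) ++ [c0]) :=
          pvIsKey_prefix ht hpre2
        rcases pvIsKey_inv hkc0 (by simp) with ⟨u0, q0, heq, hP0, hu0⟩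
        have hq0 : q0 = [] := by
          have hl := congrArg List.length heq
          simp only [List.length_append, List.length_cons, List.length_nil,
            List.nil_append] at hl
          exact List.eq_nil_of_length_eq_zero (by omega)
        rw [hq0] at hu0
        have hu0r : u0 = root_pid := pvIsKey_node hu0 pvIsKey.root
        rw [hu0r] at hP0
        have hc0C : c0 ∈ pvC snapshots root_pid := (pvCtx_memC hc root_pid c0).mpr hP0
        have hc0root : c0 ≠ root_pid := (pvIsKey_mem hkc0 c0 (by simp)).1
        have hc0uns : (!(PySem.Set.contains (PySem.Set.add PySem.Set.empty root_pid) c0))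
            = true := by
          rw [pvContains_add]
          have h0 : PySem.Set.contains PySem.Set.empty c0 = false := rfl
          have hb : (c0 == root_pid) = false := by simpa using hc0root
          rw [h0, hb]
          rfl
        refine Or.inr ⟨(([] : List Int) ++ [c0], c0), ?_, hpre2⟩
        exact List.mem_map.mpr ⟨c0, List.mem_filter.mpr ⟨hc0C, hc0uns⟩, rfl⟩
    have hi8 : (PySem.List.sorted ((pvChildren (PySem.Dict.mk snapshots)).getD root_pid [])
          (fun x => x) false).length + pvTP snapshots (PySem.Set.add PySem.Set.empty root_pid)
        ≤ (PySem.Dict.mk snapshots).size := by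
      have htp := pvCtx_TP_add hc PySem.Set.empty root_pid hce
      have htp0 : pvTP snapshots PySem.Set.empty = snapshots.length := by
        unfold pvTP
        have hall : ∀ pr ∈ snapshots,
            (!(PySem.Set.contains PySem.Set.empty (pvPP pr))) = true := fun pr _ => rfl
        rw [List.filter_eq_self.mpr hall]
      have hlenC : (PySem.List.sorted ((pvChildren (PySem.Dict.mk snapshots)).getD root_pid [])
          (fun x => x) false).length = (pvC snapshots root_pid).length := rfl
      have hsize : (PySem.Dict.mk snapshots).size = snapshots.length := rfl
      rw [hlenC, hsize]
      omega
    obtain ⟨KL, hres, hsound, hpw4, hcomp⟩ := pvLoop_main hc (PySem.Dict.mk snapshots).size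
      (PySem.List.sorted ((pvChildren (PySem.Dict.mk snapshots)).getD root_pid [])
        (fun x => x) false)
      (PySem.Set.add PySem.Set.empty root_pid)
      [(([] : List Int), root_pid)]
      (((pvC snapshots root_pid).filter
        (fun c => !(PySem.Set.contains (PySem.Set.add PySem.Set.empty root_pid) c))).map
        (fun c => (([] : List Int) ++ [c], c)))
      hi1 hi2 hi3 hi4 hi5 hi6 hi7 hi8
    have hres' : pvLoopA (pvChildren (PySem.Dict.mk snapshots)) (PySem.Dict.mk snapshots).size
        (PySem.List.sorted ((pvChildren (PySem.Dict.mk snapshots)).getD root_pid [])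
          (fun x => x) false)
        (PySem.Set.add PySem.Set.empty root_pid) [root_pid] = KL.map (·.2) := hres
    rw [hres']
    show KL.map (·.2) = (PySem.List.sorted2
      (pvKeyed (pvParent (PySem.Dict.mk snapshots)) root_pid
        (pvParent (PySem.Dict.mk snapshots)).size)
      (fun t => (t.1.length : Int)) (fun t => t.1) false).map (·.2)
    have hKLnodup : KL.Nodup := List.Nodup.of_map _ (pvKeyedNodup KL hsound hpw4)
    have hkeyednodup : (pvKeyed (pvParent (PySem.Dict.mk snapshots)) root_pid
        (pvParent (PySem.Dict.mk snapshots)).size).Nodup :=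
      List.Nodup.of_map _ (pvKeyed_nodup hc)
    have hmemiff : ∀ a, a ∈ KL ↔ a ∈ pvKeyed (pvParent (PySem.Dict.mk snapshots)) root_pid
        (pvParent (PySem.Dict.mk snapshots)).size := by
      intro a
      rw [pvKeyed_mem hc a]
      constructor
      · intro ha; exact hsound a ha
      · intro ha
        have := hcomp a.2 a.1 ha
        simpa using this
    have hperm : KL.Perm (pvKeyed (pvParent (PySem.Dict.mk snapshots)) root_pid
        (pvParent (PySem.Dict.mk snapshots)).size) :=
      (List.perm_ext_iff_of_nodup hKLnodup hkeyednodup).mpr hmemiff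
    have hsorted := pvSorted2_eq (pvKeyed (pvParent (PySem.Dict.mk snapshots)) root_pid
        (pvParent (PySem.Dict.mk snapshots)).size) KL hperm (List.pairwise_map.mp hpw4)
    rw [hsorted]
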